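-- pv_equiv track=rewrite | github.com/CIGIHub/cigionline | articles/tts.py | _ensure_terminal_punct
-- ===== SOURCE A (Python) =====
-- _TERMINALS = '.!?…'
--
-- _CLOSERS = '\'"”’»)]}'
--
-- def _ensure_terminal_punct(text, terminal_mark='.'):
--     trimmed_text = text.rstrip()
--     result_text = ''
--     if trimmed_text:
--         last_char = trimmed_text[-1]
--         if last_char in _TERMINALS:
--             result_text = trimmed_text
--         elif last_char in _CLOSERS:
--             scan_index = len(trimmed_text) - 1
--             while scan_index >= 0 and trimmed_text[scan_index] in _CLOSERS + ' ':
--                 scan_index -= 1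
--             if scan_index >= 0 and trimmed_text[scan_index] in _TERMINALS:
--                 result_text = trimmed_text
--             else:
--                 leading_text = trimmed_text[:scan_index + 1]
--                 trailing_closers = trimmed_text[scan_index + 1:]
--                 result_text = leading_text + terminal_mark + trailing_closers
--         else:
--             result_text = trimmed_text + terminal_mark
--     return result_text
-- ===== SOURCE B (Python) =====
-- _TERMINALS = '.!?…'
--
-- _CLOSERS = '\'"”’»)]}'
--
-- def _punctuate(s, mark):
--     # Recursively peel trailing closers/spaces, rebuilding them as the
--     # recursion unwinds; the base cases decide where the mark goes.
--     if not s: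
--         return mark
--     last = s[-1]
--     if last in _TERMINALS:
--         return s
--     if last in _CLOSERS + ' ':
--         return _punctuate(s[:-1], mark) + last
--     return s + mark
--
-- def _ensure_terminal_punct(text, terminal_mark='.'):
--     trimmed_text = text.rstrip()
--     if not trimmed_text:
--         return ''
--     return _punctuate(trimmed_text, terminal_mark)
-- ===== Notes on version B (the rewrite author's own statement) =====
-- stated objective: alternative
-- what changed: Replaces A's manual backward index scan with three separate result branches by a recursive helper that peels trailing closers/spaces one character at a time and rebuilds them while the recursion unwinds, deciding at the base case whether to keep the text or insert the mark.
import Mathlib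
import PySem

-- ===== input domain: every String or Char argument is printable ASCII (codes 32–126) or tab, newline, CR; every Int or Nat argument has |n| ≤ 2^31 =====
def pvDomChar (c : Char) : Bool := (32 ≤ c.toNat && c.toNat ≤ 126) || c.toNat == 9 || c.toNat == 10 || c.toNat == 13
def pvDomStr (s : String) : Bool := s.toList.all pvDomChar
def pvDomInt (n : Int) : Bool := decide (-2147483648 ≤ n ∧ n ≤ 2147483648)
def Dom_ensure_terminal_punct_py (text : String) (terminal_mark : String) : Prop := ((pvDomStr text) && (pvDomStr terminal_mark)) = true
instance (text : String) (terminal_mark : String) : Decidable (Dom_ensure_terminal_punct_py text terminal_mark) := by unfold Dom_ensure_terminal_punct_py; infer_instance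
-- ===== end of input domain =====

-- B replaces A's manual backward index scan and three-way branch by a recursive helper that
-- peels trailing closers/spaces one at a time and rebuilds them as the recursion unwinds:
-- a different (recursive) decomposition of the same task, same cost.

-- module constants shared by both Pythons
def pvTERMINALS : List Char := ['.', '!', '?', '…']
def pvCLOSERS : List Char := ['\'', '"', '”', '’', '»', ')', ']', '}']

-- ===== PORT A =====
-- A's while loop: scan backward while the character is a closer or a space
def pvScanA (cs : List Char) (i : Int) : Int :=
  if h : 0 ≤ i ∧ (PySem.List.pyGet? cs i).elim false (fun c => c ∈ pvCLOSERS ++ [' ']) then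
    pvScanA cs (i - 1)
  else i
termination_by (i + 1).toNat
decreasing_by omega

def ensure_terminal_punct_py (text : String) (terminal_mark : String) : String :=
  let trimmed := PySem.Chars.rstrip text.toList
  if trimmed ≠ [] then
    match PySem.List.pyGet? trimmed (-1) with
    | none => ""   -- unreachable: trimmed is nonempty
    | some last_char =>
      if last_char ∈ pvTERMINALS then String.ofList trimmed
      else if last_char ∈ pvCLOSERS then
        let j := pvScanA trimmed ((trimmed.length : Int) - 1)
        if 0 ≤ j ∧ (PySem.List.pyGet? trimmed j).elim false (fun c => c ∈ pvTERMINALS) then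
          String.ofList trimmed
        else
          String.ofList (PySem.List.slice trimmed none (some (j + 1)) ++ terminal_mark.toList
                     ++ PySem.List.slice trimmed (some (j + 1)) none)
      else String.ofList (trimmed ++ terminal_mark.toList)
  else ""

-- ===== PORT B =====
-- B's recursive helper: peel trailing closers/spaces, rebuild them while unwinding
def pvPunctuate (s mark : List Char) : List Char :=
  if hs : s = [] then mark
  else
    let last := s.getLast hs
    if last ∈ pvTERMINALS then s
    else if last ∈ pvCLOSERS ++ [' '] then pvPunctuate s.dropLast mark ++ [last]
    else s ++ mark
termination_by s.length
decreasing_by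
  have := List.length_pos_of_ne_nil hs
  simp [List.length_dropLast]; omega

def ensure_terminal_punct_py_alt (text : String) (terminal_mark : String) : String :=
  let trimmed := PySem.Chars.rstrip text.toList
  if trimmed = [] then ""
  else String.ofList (pvPunctuate trimmed terminal_mark.toList)

-- ===== PRECONDITION & SPEC =====
def Spec_ensure_terminal_punct_py (text : String) (terminal_mark : String) (out : String) : Prop := out = ensure_terminal_punct_py_alt text terminal_mark
instance (text : String) (terminal_mark : String) (out : String) : Decidable (Spec_ensure_terminal_punct_py text terminal_mark out) := by unfold Spec_ensure_terminal_punct_py; infer_instance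

-- ===== CLAIM (what is proved, stated in full; the proofs are below) =====
def Claim_equal_ensure_terminal_punct_py : Prop := ∀ (text : String) (terminal_mark : String), Dom_ensure_terminal_punct_py text terminal_mark → Spec_ensure_terminal_punct_py text terminal_mark (ensure_terminal_punct_py text terminal_mark)

-- ===== LEMMAS AND PROOFS =====

lemma pvGet_append_left (l l2 : List Char) (i : Int) (h0 : 0 ≤ i) (h : i < l.length) :
    PySem.List.pyGet? (l ++ l2) i = PySem.List.pyGet? l i := by
  have hl : i < ((l ++ l2).length : Int) := by simp; omega
  have ht : i.toNat < l.length := by omega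
  simp only [PySem.List.pyGet?, PySem.List.pyIdx?, if_pos h0, if_pos h, if_pos hl,
    Option.bind_some, List.getElem?_append_left ht]

lemma pvGet_last (l : List Char) (a : Char) : PySem.List.pyGet? (l ++ [a]) (-1) = some a := by
  simp [PySem.List.pyGet?, PySem.List.pyIdx?]

lemma pvScanA_prefix (ys zs : List Char) (i : Int) (h : i < ys.length) :
    pvScanA (ys ++ zs) i = pvScanA ys i := by
  conv_lhs => rw [pvScanA]
  conv_rhs => rw [pvScanA]
  by_cases h0 : 0 ≤ i
  · rw [pvGet_append_left ys zs i h0 h]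
    split_ifs with hcond
    · exact pvScanA_prefix ys zs (i - 1) (by omega)
    · rfl
  · rw [dif_neg (by tauto), dif_neg (by tauto)]
termination_by (i + 1).toNat
decreasing_by omega

lemma pvScanA_rev (r : List Char) :
    pvScanA r.reverse ((r.length : Int) - 1)
      = ((r.dropWhile (· ∈ pvCLOSERS ++ [' '])).length : Int) - 1 := by
  induction r with
  | nil => rw [pvScanA]; simp
  | cons c rt ih =>
    have hidx : ((c :: rt).length : Int) - 1 = (rt.length : Int) := by simp
    have hrev : (c :: rt).reverse = rt.reverse ++ [c] := by simp
    have hget : PySem.List.pyGet? (rt.reverse ++ [c]) ((rt.length : Int)) = some c := by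
      simp
    by_cases hc : c ∈ pvCLOSERS ++ [' ']
    · rw [hidx, hrev, pvScanA]
      rw [dif_pos (by
        refine ⟨by positivity, ?_⟩
        rw [hget]
        simpa using hc)]
      rw [pvScanA_prefix rt.reverse [c] _ (by simp only [List.length_reverse]; omega)]
      rw [List.dropWhile_cons, if_pos (by simpa using hc)]
      exact ih
    · rw [hidx, hrev, pvScanA]
      rw [dif_neg (by
        rintro ⟨-, habs⟩
        rw [hget] at habs
        exact hc (by simpa using habs))]
      rw [List.dropWhile_cons, if_neg (by simpa using hc)]
      simp

-- last character of a nonempty rstrip result is not a space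
lemma pvRstrip_last_not_space (xs : List Char) (last : Char) (rt : List Char)
    (hr : (PySem.Chars.rstrip xs).reverse = last :: rt) : last ≠ ' ' := by
  have hd : (PySem.Chars.rstrip xs).reverse = List.dropWhile PySem.Chars.isspace xs.reverse := by
    simp [PySem.Chars.rstrip]
  rw [hd] at hr
  have h2 : List.dropWhile PySem.Chars.isspace xs.reverse ≠ [] := by rw [hr]; simp
  have h3 := List.head_dropWhile_not PySem.Chars.isspace h2
  simp only [hr, List.head_cons] at h3
  intro e
  rw [e] at h3
  exact absurd h3 (by decide)

-- characterization of B's recursive helper, by induction on the reversed string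
lemma pvPunctuate_rev (r mark : List Char) :
    pvPunctuate r.reverse mark =
      match List.dropWhile (fun c => decide (c ∈ pvCLOSERS ++ [' '])) r with
      | [] => mark ++ r.reverse
      | hd :: dtl =>
        if hd ∈ pvTERMINALS then r.reverse
        else dtl.reverse ++ [hd] ++ mark
             ++ (List.takeWhile (fun c => decide (c ∈ pvCLOSERS ++ [' '])) r).reverse := by
  induction r with
  | nil => rw [pvPunctuate]; simp
  | cons c rt ih =>
    have hne : rt.reverse ++ [c] ≠ [] := by simp
    rw [show (c :: rt).reverse = rt.reverse ++ [c] by simp, pvPunctuate, dif_neg hne]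
    simp only [List.getLast_concat, List.dropLast_concat]
    by_cases hT : c ∈ pvTERMINALS
    · have hP : c ∉ pvCLOSERS ++ [' '] := by fin_cases hT <;> decide
      rw [if_pos hT, List.dropWhile_cons, if_neg (by simpa using hP)]
      simp [hT]
    · rw [if_neg hT]
      by_cases hP : c ∈ pvCLOSERS ++ [' ']
      · rw [if_pos hP, ih, List.dropWhile_cons, if_pos (by simpa using hP),
          List.takeWhile_cons, if_pos (by simpa using hP)]
        cases hdw : List.dropWhile (fun c => decide (c ∈ pvCLOSERS ++ [' '])) rt with
        | nil => simp
        | cons hd dtl =>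
          by_cases hhd : hd ∈ pvTERMINALS
          · simp [hhd]
          · simp [hhd]
      · rw [if_neg hP, List.dropWhile_cons, if_neg (by simpa using hP),
          List.takeWhile_cons, if_neg (by simpa using hP)]
        simp [hT]

-- ===== VERDICT (by name: the statement is the Claim_ definition above) =====
theorem ensure_terminal_punct_py_spec : Claim_equal_ensure_terminal_punct_py := by
  intro text terminal_mark _
  unfold Spec_ensure_terminal_punct_py ensure_terminal_punct_py ensure_terminal_punct_py_alt
  simp only []
  set cs := PySem.Chars.rstrip text.toList with hcs
  by_cases hne : cs = []
  · simp [hne]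
  · have hrne : cs.reverse ≠ [] := by simpa using hne
    obtain ⟨last, rt, hr⟩ := List.exists_cons_of_ne_nil hrne
    have hcseq : cs = rt.reverse ++ [last] := by
      have := congrArg List.reverse hr
      simpa using this
    have hlastne : last ≠ ' ' := pvRstrip_last_not_space text.toList last rt (hcs ▸ hr)
    have hgetlast : PySem.List.pyGet? cs (-1) = some last := by rw [hcseq]; exact pvGet_last _ _
    have hj : pvScanA cs ((cs.length : Int) - 1)
        = ((List.dropWhile (· ∈ pvCLOSERS ++ [' ']) cs.reverse).length : Int) - 1 := by
      have := pvScanA_rev cs.reverse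
      simpa using this
    have hB : pvPunctuate cs terminal_mark.toList =
        match List.dropWhile (fun c => decide (c ∈ pvCLOSERS ++ [' '])) cs.reverse with
        | [] => terminal_mark.toList ++ cs
        | hd :: dtl =>
          if hd ∈ pvTERMINALS then cs
          else dtl.reverse ++ [hd] ++ terminal_mark.toList
               ++ (List.takeWhile (fun c => decide (c ∈ pvCLOSERS ++ [' '])) cs.reverse).reverse := by
      have := pvPunctuate_rev cs.reverse terminal_mark.toList
      simpa using this
    have hsplit : cs = (List.dropWhile (· ∈ pvCLOSERS ++ [' ']) cs.reverse).reverse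
        ++ (List.takeWhile (· ∈ pvCLOSERS ++ [' ']) cs.reverse).reverse := by
      have h := List.takeWhile_append_dropWhile (p := fun c => decide (c ∈ pvCLOSERS ++ [' ']))
        (l := cs.reverse)
      conv_lhs => rw [← cs.reverse_reverse, ← h]
      rw [List.reverse_append]
    rw [if_pos hne, if_neg hne, hgetlast, hB]
    simp only []
    by_cases hT : last ∈ pvTERMINALS
    · -- A's first branch; B's dropWhile keeps everything and its head is the terminal
      have hp : last ∉ pvCLOSERS ++ [' '] := by fin_cases hT <;> decide
      have hdr : List.dropWhile (fun c => decide (c ∈ pvCLOSERS ++ [' '])) cs.reverse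
          = cs.reverse := by
        rw [hr, List.dropWhile_cons, if_neg (by simpa using hp)]
      rw [if_pos hT, hdr, hr]
      simp [hT]
    · rw [if_neg hT]
      by_cases hC : last ∈ pvCLOSERS
      · -- last is a closer: A's backward scan lands exactly at B's recursion base
        rw [if_pos hC]
        cases hdw : List.dropWhile (fun c => decide (c ∈ pvCLOSERS ++ [' '])) cs.reverse with
        | nil =>
          -- everything is closers/spaces: the mark goes in front
          have hjv : pvScanA cs ((cs.length : Int) - 1) = -1 := by rw [hj, hdw]; simp
          rw [hjv, if_neg (by rintro ⟨h0, -⟩; exact absurd h0 (by decide))]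
          have hA1 : PySem.List.slice cs none (some ((-1 : Int) + 1)) = [] := by
            norm_num; simp [pysem]
          have hA2 : PySem.List.slice cs (some ((-1 : Int) + 1)) none = cs := by norm_num
          rw [hA1, hA2]
          simp
        | cons hd dtl =>
          -- A's scan index j = dtl.length; B's recursion base sees hd
          have hjv : pvScanA cs ((cs.length : Int) - 1) = (dtl.length : Int) := by
            rw [hj, hdw]; push_cast [List.length_cons]; ring
          have hcs2 : cs = dtl.reverse ++ hd :: (List.takeWhile
              (fun c => decide (c ∈ pvCLOSERS ++ [' '])) cs.reverse).reverse := by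
            conv_lhs => rw [hsplit]
            rw [hdw]
            simp
          have hget : PySem.List.pyGet? cs ((dtl.length : Int)) = some hd := by
            conv_lhs => rw [hcs2]
            simp
          rw [hjv, hget]
          simp only [Option.elim_some]
          by_cases hhd : hd ∈ pvTERMINALS
          · rw [if_pos ⟨by positivity, by simpa using hhd⟩, if_pos (by simpa using hhd)]
          · rw [if_neg (by rintro ⟨-, habs⟩; exact hhd (by simpa using habs)),
              if_neg (by simpa using hhd)]
            have hc1 : ((dtl.length : Int) + 1) = (((dtl.reverse ++ [hd]).length : Nat) : Int) := by
              simp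
            have hA1 : PySem.List.slice cs none (some ((dtl.length : Int) + 1))
                = dtl.reverse ++ [hd] := by
              rw [hc1, PySem.List.slice_to_natCast]
              conv_lhs => rw [hcs2]
              rw [show dtl.reverse ++ hd :: (List.takeWhile
                  (fun c => decide (c ∈ pvCLOSERS ++ [' '])) cs.reverse).reverse
                = (dtl.reverse ++ [hd]) ++ (List.takeWhile
                  (fun c => decide (c ∈ pvCLOSERS ++ [' '])) cs.reverse).reverse by simp]
              exact List.take_left
            have hA2 : PySem.List.slice cs (some ((dtl.length : Int) + 1)) none
                = (List.takeWhile (fun c => decide (c ∈ pvCLOSERS ++ [' '])) cs.reverse).reverse := by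
              rw [hc1, PySem.List.slice_from_natCast]
              conv_lhs => rw [hcs2]
              rw [show dtl.reverse ++ hd :: (List.takeWhile
                  (fun c => decide (c ∈ pvCLOSERS ++ [' '])) cs.reverse).reverse
                = (dtl.reverse ++ [hd]) ++ (List.takeWhile
                  (fun c => decide (c ∈ pvCLOSERS ++ [' '])) cs.reverse).reverse by simp]
              exact List.drop_left
            rw [hA1, hA2]
      · -- last is neither terminal nor closer (nor space): both append the mark
        have hp : last ∉ pvCLOSERS ++ [' '] := by
          simp only [List.mem_append, List.mem_singleton]
          rintro (h1 | h2)
          exacts [hC h1, hlastne h2]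
        have hdr : List.dropWhile (fun c => decide (c ∈ pvCLOSERS ++ [' '])) cs.reverse
            = cs.reverse := by
          rw [hr, List.dropWhile_cons, if_neg (by simpa using hp)]
        rw [if_neg hC, hdr, hr]
        have htk : List.takeWhile (fun c => decide (c ∈ pvCLOSERS ++ [' '])) cs.reverse = [] := by
          rw [hr, List.takeWhile_cons, if_neg (by simpa using hp)]
        rw [← hr, htk]
        simp only [hr]
        rw [if_neg hT]
        have : rt.reverse ++ [last] = cs := hcseq.symm
        simp [this]
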